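-- pv_equiv track=rewrite | github.com/bigchuck/meal-planner | mealplan_logger.py | parse_index_args
-- ===== SOURCE A (Python) =====
-- def parse_index_args(arg: str, n: int):
--     """
--     Parse things like '3', '2,4,7', '3-6' into a sorted list of 0-based indexes within [0, n).
--     """
--     idxs = set()
--     for part in arg.split(","):
--         part = part.strip()
--         if not part: continue
--         if "-" in part:
--             a,b = part.split("-",1)
--             try:
--                 a = int(a); b = int(b)
--                 for i in range(min(a,b), max(a,b)+1):
--                     if 1 <= i <= n: idxs.add(i-1)
--             except: pass
--         else:
--             try:
--                 i = int(part)
--                 if 1 <= i <= n: idxs.add(i-1)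
--             except:
--                 pass
--     return sorted(idxs)
-- ===== SOURCE B (Python) =====
-- def _part_bounds(part):
--     """Raw (lo, hi) bounds of one non-empty spec part, or None if unparsable."""
--     if "-" in part:
--         a, b = part.split("-", 1)
--         try:
--             lo, hi = int(a), int(b)
--         except ValueError:
--             return None
--         return (hi, lo) if lo > hi else (lo, hi)
--     try:
--         i = int(part)
--     except ValueError:
--         return None
--     return (i, i)
--
--
-- def parse_index_args(arg: str, n: int):
--     """
--     Parse things like '3', '2,4,7', '3-6' into a sorted list of 0-based indexes within [0, n).
--     Interval version: collect the parts as intervals clamped to [1, n], sort them by start and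
--     emit their union in one sweep -- no index set, no per-index loop outside [0, n), no final sort.
--     """
--     intervals = []
--     for part in arg.split(","):
--         part = part.strip()
--         if not part:
--             continue
--         bounds = _part_bounds(part)
--         if bounds is None:
--             continue
--         lo, hi = max(bounds[0], 1), min(bounds[1], n)
--         if lo <= hi:
--             intervals.append((lo - 1, hi - 1))
--     intervals.sort(key=lambda iv: iv[0])
--     res = []
--     nxt = 0
--     for lo, hi in intervals:
--         res.extend(range(max(lo, nxt), hi + 1))
--         nxt = max(nxt, hi + 1)
--     return res
-- ===== Notes on version B (the rewrite author's own statement) =====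
-- stated objective: alternative
-- what changed: Replaces A's per-index set accumulation plus sorted() by interval merging: each part becomes one interval clamped to [1, n], the intervals are sorted by start and their union is emitted in a single sweep, so no index set is built, no loop ever walks outside [0, n), and the indexes are never sorted.
import Mathlib
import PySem

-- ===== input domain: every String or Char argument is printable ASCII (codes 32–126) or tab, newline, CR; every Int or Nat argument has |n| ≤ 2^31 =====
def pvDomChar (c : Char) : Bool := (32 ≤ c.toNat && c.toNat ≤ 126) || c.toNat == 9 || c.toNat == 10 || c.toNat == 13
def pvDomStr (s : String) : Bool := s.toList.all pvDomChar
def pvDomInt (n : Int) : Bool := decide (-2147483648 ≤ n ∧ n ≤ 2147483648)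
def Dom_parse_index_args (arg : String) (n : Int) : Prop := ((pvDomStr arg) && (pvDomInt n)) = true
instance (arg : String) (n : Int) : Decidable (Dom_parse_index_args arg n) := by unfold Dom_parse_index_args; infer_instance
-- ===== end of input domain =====

-- B replaces A's per-index set accumulation plus sorted() by interval merging: each part becomes
-- one interval clamped to [1, n], the intervals are sorted by start and their union is emitted in
-- one sweep (objective: alternative — no index set, no walking outside [0, n), no final index sort).


-- ===== PORT A =====
-- one iteration of A's "for part in arg.split(',')" loop body ('part' after 'part = part.strip()')
def pyAStep (n : Int) (idxs : PySem.Set Int) (part : String) : PySem.Set Int :=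
  if PySem.Str.strip part = "" then idxs                    -- if not part: continue
  else if PySem.Str.isIn "-" (PySem.Str.strip part) then
    match PySem.Str.splitMax? (PySem.Str.strip part) "-" 1 with     -- a, b = part.split("-", 1)
    | some (a :: b :: _) =>
      match PySem.Int.ofStr? a, PySem.Int.ofStr? b with     -- a = int(a); b = int(b); except: pass
      | some a, some b =>
          (PySem.List.pyRange (min a b) (max a b + 1) 1).foldl
            (fun s i => if 1 ≤ i ∧ i ≤ n then PySem.Set.add s (i - 1) else s) idxs
      | _, _ => idxs
    | _ => idxs                                             -- unreachable: "-" ∈ part gives ≥ 2 pieces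
  else
    match PySem.Int.ofStr? (PySem.Str.strip part) with      -- i = int(part); except: pass
    | some i => if 1 ≤ i ∧ i ≤ n then PySem.Set.add idxs (i - 1) else idxs
    | none => idxs

def parse_index_args (arg : String) (n : Int) : List Int :=
  let idxs := ((PySem.Str.split? arg ",").getD []).foldl (pyAStep n) PySem.Set.empty
  PySem.List.sorted idxs (fun x => x) false                 -- sorted(idxs)

-- ===== PORT B =====
-- bounds of one (already stripped, non-empty) part: (lo, hi) after the swap, or none (unparsable)
def pyBBounds (part : String) : Option (Int × Int) :=
  if PySem.Str.isIn "-" part then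
    match PySem.Str.splitMax? part "-" 1 with                -- a, b = part.split("-", 1)
    | some (a :: b :: _) =>
      match PySem.Int.ofStr? a, PySem.Int.ofStr? b with      -- lo, hi = int(a), int(b); except: None
      | some lo, some hi => some (if lo > hi then (hi, lo) else (lo, hi))
      | _, _ => none
    | _ => none                                              -- unreachable: "-" ∈ part gives ≥ 2 pieces
  else
    match PySem.Int.ofStr? part with
    | some i => some (i, i)
    | none => none

-- one iteration of B's collection loop: clamp to [1, n], keep the non-empty intervals (0-based)
def pyBStep (n : Int) (acc : List (Int × Int)) (part : String) : List (Int × Int) :=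
  if PySem.Str.strip part = "" then acc
  else
    match pyBBounds (PySem.Str.strip part) with
    | none => acc
    | some bd =>
        if max bd.1 1 ≤ min bd.2 n then acc ++ [(max bd.1 1 - 1, min bd.2 n - 1)] else acc

-- one iteration of B's sweep: emit the yet-unseen indexes of the interval, advance the frontier
def pyBEmit (st : List Int × Int) (iv : Int × Int) : List Int × Int :=
  (st.1 ++ PySem.List.pyRange (max iv.1 st.2) (iv.2 + 1) 1, max st.2 (iv.2 + 1))

def parse_index_args_alt (arg : String) (n : Int) : List Int :=
  let intervals := ((PySem.Str.split? arg ",").getD []).foldl (pyBStep n) []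
  ((PySem.List.sorted intervals (fun iv => iv.1) false).foldl pyBEmit ([], 0)).1

-- ===== PRECONDITION & SPEC =====
def Spec_parse_index_args (arg : String) (n : Int) (out : List Int) : Prop := out = parse_index_args_alt arg n
instance (arg : String) (n : Int) (out : List Int) : Decidable (Spec_parse_index_args arg n out) := by unfold Spec_parse_index_args; infer_instance

-- ===== CLAIM (what is proved, stated in full; the proofs are below) =====
def Claim_equal_parse_index_args : Prop := ∀ (arg : String) (n : Int), Dom_parse_index_args arg n → Spec_parse_index_args arg n (parse_index_args arg n)

-- ===== LEMMAS AND PROOFS =====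

-- whether one part of the spec selects 0-based index j (common characterisation of both loop bodies)
def addsIdx (n : Int) (part : String) (j : Int) : Bool :=
  if PySem.Str.strip part = "" then false
  else if PySem.Str.isIn "-" (PySem.Str.strip part) then
    match PySem.Str.splitMax? (PySem.Str.strip part) "-" 1 with
    | some (a :: b :: _) =>
      match PySem.Int.ofStr? a, PySem.Int.ofStr? b with
      | some a, some b => decide (min a b ≤ j + 1 ∧ j + 1 ≤ max a b ∧ 1 ≤ j + 1 ∧ j + 1 ≤ n)
      | _, _ => false
    | _ => false
  else
    match PySem.Int.ofStr? (PySem.Str.strip part) with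
    | some i => decide (i = j + 1 ∧ 1 ≤ i ∧ i ≤ n)
    | none => false

-- ----- A side -----
theorem foldl_guard_add_eq_update (n : Int) (L : List Int) (s : PySem.Set Int) :
    L.foldl (fun s i => if 1 ≤ i ∧ i ≤ n then PySem.Set.add s (i - 1) else s) s =
      PySem.Set.update s ((L.filter (fun i => decide (1 ≤ i ∧ i ≤ n))).map (fun i => i - 1)) := by
  rw [PySem.List.foldl_ite_eq_foldl_filter (fun i => 1 ≤ i ∧ i ≤ n)
        (fun s i => PySem.Set.add s (i - 1))]
  rw [PySem.Set.update, ← List.foldl_map]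

theorem mem_pyAStep (n : Int) (s : PySem.Set Int) (part : String) (j : Int) :
    j ∈ pyAStep n s part ↔ j ∈ s ∨ addsIdx n part j = true := by
  unfold pyAStep addsIdx
  split_ifs with h1 h2
  · simp
  · rcases hs : PySem.Str.splitMax? (PySem.Str.strip part) "-" 1 with _ | ⟨_ | ⟨a, _ | ⟨b, r⟩⟩⟩ <;>
      simp only [hs]
    · simp
    · simp
    · simp
    · rcases ha : PySem.Int.ofStr? a with _ | av <;> rcases hb : PySem.Int.ofStr? b with _ | bv <;>
        simp only [ha, hb]
      · simp
      · simp
      · simp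
      · rw [foldl_guard_add_eq_update, PySem.Set.mem_update]
        simp only [List.mem_map, List.mem_filter, PySem.List.mem_pyRange_one,
          decide_eq_true_eq]
        constructor
        · rintro (h | ⟨i, ⟨⟨hi1, hi2⟩, hg⟩, rfl⟩)
          · exact Or.inl h
          · right; omega
        · rintro (h | h)
          · exact Or.inl h
          · right; exact ⟨j + 1, ⟨⟨by omega, by omega⟩, by omega⟩, by omega⟩
  · rcases hi : PySem.Int.ofStr? (PySem.Str.strip part) with _ | iv <;> simp only [hi]
    · simp
    · split_ifs with hg
      · rw [PySem.Set.mem_add]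
        simp only [decide_eq_true_eq]
        constructor
        · rintro (h | rfl)
          · exact Or.inl h
          · right; omega
        · rintro (h | h)
          · exact Or.inl h
          · right; omega
      · simp only [decide_eq_true_eq]
        constructor
        · exact Or.inl
        · rintro (h | h)
          · exact h
          · exact absurd ⟨by omega, by omega⟩ hg

theorem nodup_pyAStep (n : Int) (s : PySem.Set Int) (part : String) (hnd : s.Nodup) :
    (pyAStep n s part).Nodup := by
  unfold pyAStep
  split_ifs with h1 h2
  · exact hnd
  · rcases hs : PySem.Str.splitMax? (PySem.Str.strip part) "-" 1 with _ | ⟨_ | ⟨a, _ | ⟨b, r⟩⟩⟩ <;>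
      simp only [hs]
    · exact hnd
    · exact hnd
    · exact hnd
    · rcases ha : PySem.Int.ofStr? a with _ | av <;> rcases hb : PySem.Int.ofStr? b with _ | bv <;>
        simp only [ha, hb]
      · exact hnd
      · exact hnd
      · exact hnd
      · rw [foldl_guard_add_eq_update]; exact PySem.Set.nodup_update s _ hnd
  · rcases hi : PySem.Int.ofStr? (PySem.Str.strip part) with _ | iv <;> simp only [hi]
    · exact hnd
    · split_ifs
      · exact PySem.Set.nodup_add s (iv - 1) hnd
      · exact hnd

theorem mem_foldl_pyAStep (n : Int) (parts : List String) (s : PySem.Set Int) (j : Int) :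
    j ∈ parts.foldl (pyAStep n) s ↔ j ∈ s ∨ parts.any (fun p => addsIdx n p j) = true := by
  induction parts generalizing s with
  | nil => simp
  | cons p t ih => simp [List.foldl_cons, ih, mem_pyAStep, List.any_cons, or_assoc]

theorem nodup_foldl_pyAStep (n : Int) (parts : List String) (s : PySem.Set Int) (hs : s.Nodup) :
    (parts.foldl (pyAStep n) s).Nodup := by
  induction parts generalizing s with
  | nil => exact hs
  | cons p t ih => exact ih _ (nodup_pyAStep n s p hs)

theorem addsIdx_bounds (n : Int) (p : String) (j : Int) (h : addsIdx n p j = true) :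
    0 ≤ j ∧ j < n := by
  unfold addsIdx at h
  by_cases h1 : PySem.Str.strip p = ""
  · rw [if_pos h1] at h; cases h
  rw [if_neg h1] at h
  by_cases h2 : PySem.Str.isIn "-" (PySem.Str.strip p) = true
  · rw [if_pos h2] at h
    rcases hs : PySem.Str.splitMax? (PySem.Str.strip p) "-" 1 with _ | ⟨_ | ⟨a, _ | ⟨b, r⟩⟩⟩ <;>
      simp only [hs, Bool.false_eq_true] at h
    rcases ha : PySem.Int.ofStr? a with _ | av <;> rcases hb : PySem.Int.ofStr? b with _ | bv <;>
      simp only [ha, hb, Bool.false_eq_true] at h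
    simp only [decide_eq_true_eq] at h; omega
  · rw [if_neg h2] at h
    rcases hi : PySem.Int.ofStr? (PySem.Str.strip p) with _ | iv <;>
      simp only [hi, Bool.false_eq_true] at h
    simp only [decide_eq_true_eq] at h; omega

-- ----- B side -----
theorem pyBStep_append (n : Int) (acc : List (Int × Int)) (part : String) :
    pyBStep n acc part = acc ++ pyBStep n [] part := by
  unfold pyBStep
  split_ifs with h1
  · simp
  · rcases hb : pyBBounds (PySem.Str.strip part) with _ | bd <;> simp only [hb]
    · simp
    · split_ifs with h2 <;> simp

theorem swap_eq_minmax (a b : Int) :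
    (if a > b then (b, a) else (a, b)) = (min a b, max a b) := by
  split_ifs with h <;> simp [Prod.ext_iff] <;> omega

theorem any_pyBStep_nil (n : Int) (part : String) (j : Int) :
    (pyBStep n [] part).any (fun p => decide (p.1 ≤ j ∧ j ≤ p.2)) = addsIdx n part j := by
  unfold pyBStep pyBBounds addsIdx
  split_ifs with h1 h2
  · rfl
  · rcases hs : PySem.Str.splitMax? (PySem.Str.strip part) "-" 1 with _ | ⟨_ | ⟨a, _ | ⟨b, r⟩⟩⟩ <;>
      simp only [hs]
    · rfl
    · rfl
    · rfl
    · rcases ha : PySem.Int.ofStr? a with _ | av <;> rcases hb : PySem.Int.ofStr? b with _ | bv <;>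
        simp only [ha, hb]
      · rfl
      · rfl
      · rfl
      · rw [swap_eq_minmax]
        split_ifs with hle
        · simp only [List.nil_append, List.any_cons, List.any_nil, Bool.or_false,
            decide_eq_decide]
          omega
        · rw [List.any_nil, eq_comm, decide_eq_false_iff_not]
          intro h
          omega
  · rcases hi : PySem.Int.ofStr? (PySem.Str.strip part) with _ | iv <;> simp only [hi]
    · rfl
    · split_ifs with hle
      · simp only [List.nil_append, List.any_cons, List.any_nil, Bool.or_false,
          decide_eq_decide]
        omega
      · rw [List.any_nil, eq_comm, decide_eq_false_iff_not]
        intro h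
        omega

theorem mem_pyBStep_nil (n : Int) (part : String) (p : Int × Int)
    (hp : p ∈ pyBStep n [] part) : 0 ≤ p.1 ∧ p.1 ≤ p.2 ∧ p.2 ≤ n - 1 := by
  unfold pyBStep at hp
  split_ifs at hp with h1
  · cases hp
  · rcases hb : pyBBounds (PySem.Str.strip part) with _ | bd <;> simp only [hb] at hp
    · cases hp
    · split_ifs at hp with h2
      · rw [List.nil_append, List.mem_singleton] at hp
        subst hp
        simp only []
        omega
      · cases hp

theorem intervals_flatMap (n : Int) (parts : List String) :
    parts.foldl (pyBStep n) [] = parts.flatMap (fun part => pyBStep n [] part) := by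
  calc parts.foldl (pyBStep n) []
      = parts.foldl (fun acc part => acc ++ pyBStep n [] part) [] :=
        PySem.List.foldl_congr_mem _ _ _ _ (fun acc part _ => pyBStep_append n acc part)
    _ = [] ++ parts.flatMap (fun part => pyBStep n [] part) :=
        PySem.List.foldl_append_eq_flatMap _ _ _
    _ = parts.flatMap (fun part => pyBStep n [] part) := List.nil_append _

theorem filter_pyRange_interval_aux : ∀ (k : Nat) (a b c d : Int), (b - a).toNat = k →
    (PySem.List.pyRange a b 1).filter (fun j => decide (c ≤ j ∧ j ≤ d)) =
      PySem.List.pyRange (max a c) (min b (d + 1)) 1 := by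
  intro k
  induction k with
  | zero =>
    intro a b c d hk
    rw [PySem.List.pyRange_one_eq_nil (by omega), PySem.List.pyRange_one_eq_nil (by omega)]
    rfl
  | succ k ih =>
    intro a b c d hk
    have hab : a < b := by omega
    rw [PySem.List.pyRange_one_cons hab, List.filter_cons]
    by_cases hc : c ≤ a ∧ a ≤ d
    · rw [if_pos (by simpa using hc), ih (a + 1) b c d (by omega),
        show max a c = a from by omega, show max (a + 1) c = a + 1 from by omega,
        ← PySem.List.pyRange_one_cons (by omega)]
    · rw [if_neg (by simpa using hc), ih (a + 1) b c d (by omega)]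
      by_cases hca : a < c
      · congr 1
        omega
      · rw [PySem.List.pyRange_one_eq_nil (by omega), PySem.List.pyRange_one_eq_nil (by omega)]

theorem filter_pyRange_interval (a b c d : Int) :
    (PySem.List.pyRange a b 1).filter (fun j => decide (c ≤ j ∧ j ≤ d)) =
      PySem.List.pyRange (max a c) (min b (d + 1)) 1 :=
  filter_pyRange_interval_aux (b - a).toNat a b c d rfl

theorem emit_fold : ∀ (ivs : List (Int × Int)) (res : List Int) (nxt M : Int),
    ivs.Pairwise (fun p q => p.1 ≤ q.1) →
    (∀ p ∈ ivs, p.1 ≤ p.2 ∧ p.2 < M) →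
    nxt ≤ M →
    (ivs.foldl pyBEmit (res, nxt)).1 =
      res ++ (PySem.List.pyRange nxt M 1).filter
        (fun j => ivs.any (fun p => decide (p.1 ≤ j ∧ j ≤ p.2))) := by
  intro ivs
  induction ivs with
  | nil =>
    intro res nxt M _ _ _
    simp
  | cons iv t ih =>
    intro res nxt M hsort hval hnxt
    obtain ⟨lo, hi⟩ := iv
    obtain ⟨hlohi, hhiM⟩ := hval (lo, hi) List.mem_cons_self
    have hhead : ∀ p ∈ t, lo ≤ p.1 := fun p hp => (List.pairwise_cons.mp hsort).1 p hp
    rw [List.foldl_cons,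
        show pyBEmit (res, nxt) (lo, hi) =
          (res ++ PySem.List.pyRange (max lo nxt) (hi + 1) 1, max nxt (hi + 1)) from rfl,
        ih _ _ M (List.pairwise_cons.mp hsort).2
          (fun p hp => hval p (List.mem_cons_of_mem _ hp)) (by omega),
        List.append_assoc]
    congr 1
    rw [PySem.List.pyRange_one_append nxt (max nxt (hi + 1)) M (by omega) (by omega),
        List.filter_append]
    congr 1
    · have e1 : (PySem.List.pyRange nxt (max nxt (hi + 1)) 1).filter
          (fun j => ((lo, hi) :: t).any (fun p => decide (p.1 ≤ j ∧ j ≤ p.2))) =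
            (PySem.List.pyRange nxt (max nxt (hi + 1)) 1).filter
              (fun j => decide (lo ≤ j ∧ j ≤ hi)) := by
        apply List.filter_congr
        intro j hj
        rw [PySem.List.mem_pyRange_one] at hj
        simp only [List.any_cons]
        by_cases hd : lo ≤ j ∧ j ≤ hi
        · simp [hd]
        · have ht : t.any (fun p => decide (p.1 ≤ j ∧ j ≤ p.2)) = false := by
            rw [List.any_eq_false]
            intro p hp
            simp only [decide_eq_true_eq]
            intro hcov
            have := hhead p hp
            exact hd ⟨by omega, by omega⟩
          rw [ht, Bool.or_false]
      rw [e1, filter_pyRange_interval]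
      congr 1 <;> omega
    · apply List.filter_congr
      intro j hj
      rw [PySem.List.mem_pyRange_one] at hj
      simp only [List.any_cons]
      have hfalse : decide (lo ≤ j ∧ j ≤ hi) = false := by
        simp only [decide_eq_false_iff_not]
        omega
      rw [hfalse, Bool.false_or]

theorem A_eq (parts : List String) (n : Int) :
    PySem.List.sorted (parts.foldl (pyAStep n) PySem.Set.empty) (fun x => x) false =
      (PySem.List.pyRange 0 n 1).filter (fun j => parts.any (fun p => addsIdx n p j)) := by
  apply PySem.List.sorted_eq_of_perm_of_pairwise_lt
  · rw [List.perm_ext_iff_of_nodup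
        (List.Nodup.filter _ (PySem.List.nodup_pyRange_one 0 n))
        (nodup_foldl_pyAStep n parts PySem.Set.empty List.nodup_nil)]
    intro j
    rw [List.mem_filter, PySem.List.mem_pyRange_one, mem_foldl_pyAStep]
    constructor
    · rintro ⟨hb, hc⟩; exact Or.inr hc
    · rintro (h | h)
      · cases h
      · obtain ⟨p, hp, hpp⟩ := List.any_eq_true.mp h
        have hb := addsIdx_bounds n p j (by simpa using hpp)
        exact ⟨⟨by omega, by omega⟩, h⟩
  · exact List.Pairwise.filter _ (PySem.List.pairwise_lt_pyRange_one 0 n)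

theorem B_eq (parts : List String) (n : Int) :
    ((PySem.List.sorted (parts.foldl (pyBStep n) []) (fun iv => iv.1) false).foldl
        pyBEmit ([], 0)).1 =
      (PySem.List.pyRange 0 n 1).filter (fun j => parts.any (fun p => addsIdx n p j)) := by
  have hperm : (PySem.List.sorted (parts.foldl (pyBStep n) []) (fun iv => iv.1) false).Perm
      (parts.foldl (pyBStep n) []) := PySem.List.sorted_perm _ _ _
  have hmem : ∀ p ∈ PySem.List.sorted (parts.foldl (pyBStep n) []) (fun iv => iv.1) false,
      0 ≤ p.1 ∧ p.1 ≤ p.2 ∧ p.2 ≤ n - 1 := by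
    intro p hp
    have h2 := hperm.mem_iff.mp hp
    rw [intervals_flatMap, List.mem_flatMap] at h2
    obtain ⟨part, _, hpart⟩ := h2
    exact mem_pyBStep_nil n part p hpart
  rw [emit_fold _ [] 0 (max n 0)
        (PySem.List.sorted_pairwise _ _)
        (fun p hp => ⟨(hmem p hp).2.1, by have := (hmem p hp).2.2; omega⟩)
        (by omega),
      List.nil_append]
  have hR : PySem.List.pyRange 0 (max n 0) 1 = PySem.List.pyRange 0 n 1 := by
    by_cases h : 0 ≤ n
    · congr 1
      omega
    · rw [PySem.List.pyRange_one_eq_nil (by omega), PySem.List.pyRange_one_eq_nil (by omega)]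
  rw [hR]
  apply List.filter_congr
  intro j _
  rw [hperm.any_eq, intervals_flatMap, List.any_flatMap]
  exact PySem.List.any_congr_mem (fun part _ => any_pyBStep_nil n part j)

-- ===== VERDICT (by name: the statement is the Claim_ definition above) =====
theorem parse_index_args_spec : Claim_equal_parse_index_args := by
  intro arg n _
  exact (A_eq ((PySem.Str.split? arg ",").getD []) n).trans
    (B_eq ((PySem.Str.split? arg ",").getD []) n).symm
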